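-- pv_equiv track=rewrite | github.com/aysh34/CALICO-Informatics-Competition | up.py | solve
-- ===== SOURCE A (Python) =====
-- def solve(N: int, M: int, G: list[str]) -> int:
--     """
--     Return the top-down area of the shape
--
--     N: number of rows
--     M: number of columns
--     G: an N by M grid representing the front-view and depths of the character
--     """
--     area = 0
--
--     for col in range(M):
--         max_d = 0
--         for row in range(N):
--             if G[row][col] != ".":
--                 d = int(G[row][col])
--                 if d > max_d:
--                     max_d = d
--         area += max_d
--
--     return area
-- ===== SOURCE B (Python) =====
-- def solve(N: int, M: int, G: list[str]) -> int:
--     """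
--     Return the top-down area of the shape.
--
--     Layer counting: the area equals, summed over every depth threshold d in
--     '1'..'9', the number of columns containing some cell whose digit is >= d
--     (since a column of maximum depth m contributes to exactly the thresholds
--     1..m).  '.' sorts below every digit, so it never passes a threshold.
--     """
--     area = 0
--     for d in "123456789":
--         for col in range(M):
--             if any(G[row][col] >= d for row in range(N)):
--                 area += 1
--     return area
-- ===== Notes on version B (the rewrite author's own statement) =====
-- stated objective: alternative
-- what changed: A computes and sums the maximum depth digit of each column; B never computes a maximum or converts to int at all: it counts horizontal layers, adding 1 for every (threshold d in '1'..'9', column) pair such that the column contains a cell >= d as a character, which sums to the same area.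
import Mathlib
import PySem

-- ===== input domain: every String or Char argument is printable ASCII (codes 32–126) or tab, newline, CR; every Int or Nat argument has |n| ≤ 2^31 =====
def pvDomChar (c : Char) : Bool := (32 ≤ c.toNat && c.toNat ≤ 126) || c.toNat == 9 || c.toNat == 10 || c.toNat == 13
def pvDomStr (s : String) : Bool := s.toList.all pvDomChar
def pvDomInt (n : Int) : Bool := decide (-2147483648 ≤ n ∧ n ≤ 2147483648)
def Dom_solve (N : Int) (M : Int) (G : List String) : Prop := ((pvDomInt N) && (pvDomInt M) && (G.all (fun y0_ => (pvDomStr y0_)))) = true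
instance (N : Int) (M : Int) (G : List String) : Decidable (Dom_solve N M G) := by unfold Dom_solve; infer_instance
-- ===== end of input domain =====

-- B replaces A's per-column maximum computation by layer counting: it never takes a max or
-- converts a digit to int; it adds 1 for every (threshold '1'..'9', column) pair such that the
-- column contains a cell >= the threshold character (a column of max depth m hits thresholds 1..m).

-- ===== PORT A =====
def solve (N : Int) (M : Int) (G : List String) : Int :=
  (PySem.List.pyRange 0 M 1).foldl (fun area col =>
    let max_d := (PySem.List.pyRange 0 N 1).foldl (fun max_d row =>
      match PySem.Str.pyGet? (PySem.List.pyGetD G row "") col with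
      | none => max_d  -- IndexError: excluded by Pre_solve
      | some c =>
        if c ≠ '.' then
          let d := (PySem.Int.ofChars? [c]).getD 0  -- ValueError: excluded by Pre_solve
          if d > max_d then d else max_d
        else max_d) 0
    area + max_d) 0

-- ===== PORT B =====
def solve_alt (N : Int) (M : Int) (G : List String) : Int :=
  ("123456789".toList).foldl (fun area d =>
    (PySem.List.pyRange 0 M 1).foldl (fun area col =>
      if (PySem.List.pyRange 0 N 1).any (fun row =>
            match PySem.Str.pyGet? (PySem.List.pyGetD G row "") col with
            | none => false  -- IndexError: excluded by Pre_solve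
            | some c => decide (d ≤ c))   -- Python's 1-char string '>=' = code-point order
      then area + 1 else area) area) 0

-- ===== PRECONDITION & SPEC =====
-- Pre_solve = exactly the inputs where the Python A returns: when both loops run
-- (0 < N and 0 < M), every visited row exists, is at least M long, and every visited
-- cell is '.' or a digit (otherwise Python raises IndexError / ValueError).
def Pre_solve (N : Int) (M : Int) (G : List String) : Prop :=
  0 < N → 0 < M →
    N ≤ (G.length : Int) ∧
    (G.take N.toNat).all (fun s => decide (M ≤ (s.toList.length : Int)) &&
      (s.toList.take M.toNat).all (fun c => c == '.' || c.isDigit)) = true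
instance (N : Int) (M : Int) (G : List String) : Decidable (Pre_solve N M G) := by
  unfold Pre_solve; infer_instance
def pvWitness_solve : Int × Int × List String := (2, 3, ["12.", "3.4"])

def Spec_solve (N : Int) (M : Int) (G : List String) (out : Int) : Prop := out = solve_alt N M G
instance (N : Int) (M : Int) (G : List String) (out : Int) : Decidable (Spec_solve N M G out) := by
  unfold Spec_solve; infer_instance

-- ===== CLAIM (what is proved, stated in full; the proofs are below) =====
def Claim_equal_solve : Prop := ∀ (N : Int) (M : Int) (G : List String), Dom_solve N M G → Pre_solve N M G → Spec_solve N M G (solve N M G)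

-- ===== LEMMAS AND PROOFS =====

/-- The value A reads out of a cell: 0 for a missing cell or '.', int(c) otherwise. -/
def cellVal (G : List String) (col row : Int) : Int :=
  match PySem.Str.pyGet? (PySem.List.pyGetD G row "") col with
  | none => 0
  | some c => if c = '.' then 0 else (PySem.Int.ofChars? [c]).getD 0

/-- A valid cell: in range and '.' or a digit. -/
def cellOk (G : List String) (col row : Int) : Prop :=
  ∃ c, PySem.Str.pyGet? (PySem.List.pyGetD G row "") col = some c ∧ (c = '.' ∨ c.isDigit = true)

theorem char_eq_of_toNat (c d : Char) (h : c.toNat = d.toNat) : c = d := by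
  apply Char.ext; exact UInt32.toNat_inj.mp h

theorem char_le_iff (a b : Char) : a ≤ b ↔ a.toNat ≤ b.toNat :=
  ⟨fun h => Fin.mk_le_mk.mp h, fun h => Char.le_def.mpr h⟩

theorem digit_cases (c : Char) (h : c.isDigit = true) :
    c = '0' ∨ c = '1' ∨ c = '2' ∨ c = '3' ∨ c = '4' ∨ c = '5' ∨ c = '6' ∨ c = '7' ∨ c = '8' ∨ c = '9' := by
  simp only [Char.isDigit, Bool.and_eq_true, decide_eq_true_iff] at h
  have h1 : 48 ≤ c.toNat := by exact_mod_cast h.1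
  have h2 : c.toNat ≤ 57 := by exact_mod_cast h.2
  interval_cases hn : c.toNat
  · exact Or.inl (char_eq_of_toNat _ _ hn)
  · exact Or.inr (Or.inl (char_eq_of_toNat _ _ hn))
  all_goals first
    | exact Or.inr (Or.inr (Or.inl (char_eq_of_toNat _ _ hn)))
    | exact Or.inr (Or.inr (Or.inr (Or.inl (char_eq_of_toNat _ _ hn))))
    | exact Or.inr (Or.inr (Or.inr (Or.inr (Or.inl (char_eq_of_toNat _ _ hn)))))
    | exact Or.inr (Or.inr (Or.inr (Or.inr (Or.inr (Or.inl (char_eq_of_toNat _ _ hn))))))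
    | exact Or.inr (Or.inr (Or.inr (Or.inr (Or.inr (Or.inr (Or.inl (char_eq_of_toNat _ _ hn)))))))
    | exact Or.inr (Or.inr (Or.inr (Or.inr (Or.inr (Or.inr (Or.inr (Or.inl (char_eq_of_toNat _ _ hn))))))))
    | exact Or.inr (Or.inr (Or.inr (Or.inr (Or.inr (Or.inr (Or.inr (Or.inr (Or.inl (char_eq_of_toNat _ _ hn)))))))))
    | exact Or.inr (Or.inr (Or.inr (Or.inr (Or.inr (Or.inr (Or.inr (Or.inr (Or.inr (char_eq_of_toNat _ _ hn)))))))))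

theorem ofChars_digit (c : Char) (h : c.isDigit = true) :
    PySem.Int.ofChars? [c] = some ((c.toNat : Int) - 48) := by
  rcases digit_cases c h with rfl|rfl|rfl|rfl|rfl|rfl|rfl|rfl|rfl|rfl <;> decide

theorem mem_digits_bounds (d : Char) (hd : d ∈ "123456789".toList) :
    49 ≤ d.toNat ∧ d.toNat ≤ 57 := by
  have e : "123456789".toList = ['1','2','3','4','5','6','7','8','9'] := rfl
  rw [e] at hd
  simp only [List.mem_cons, List.not_mem_nil, or_false] at hd
  rcases hd with rfl|rfl|rfl|rfl|rfl|rfl|rfl|rfl|rfl <;> decide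

/-- A's inner fold is a running max of `cellVal` (the start value must be nonnegative). -/
theorem A_fold_eq_max (G : List String) (col : Int) :
    ∀ (rs : List Int) (m : Int), 0 ≤ m →
      rs.foldl (fun max_d row =>
        match PySem.Str.pyGet? (PySem.List.pyGetD G row "") col with
        | none => max_d
        | some c =>
          if c ≠ '.' then
            if (PySem.Int.ofChars? [c]).getD 0 > max_d then (PySem.Int.ofChars? [c]).getD 0 else max_d
          else max_d) m
      = rs.foldl (fun m row => max m (cellVal G col row)) m := by
  intro rs
  induction rs with
  | nil => intro m _; rfl
  | cons r rs ih =>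
    intro m hm
    simp only [List.foldl_cons]
    have hstep : (match PySem.Str.pyGet? (PySem.List.pyGetD G r "") col with
        | none => m
        | some c =>
          if c ≠ '.' then
            if (PySem.Int.ofChars? [c]).getD 0 > m then (PySem.Int.ofChars? [c]).getD 0 else m
          else m) = max m (cellVal G col r) := by
      unfold cellVal
      cases PySem.Str.pyGet? (PySem.List.pyGetD G r "") col with
      | none => simp; omega
      | some c =>
        by_cases hc : c = '.'
        · simp [hc]; omega
        · simp only [hc, ne_eq, not_false_eq_true, if_pos, if_neg]
          split_ifs with h <;> omega
    rw [hstep, ih _ (le_trans hm (le_max_left _ _))]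

theorem le_maxfold_iff (f : Int → Int) (v : Int) :
    ∀ (rs : List Int) (a : Int),
      (v ≤ rs.foldl (fun m r => max m (f r)) a) ↔ v ≤ a ∨ ∃ r ∈ rs, v ≤ f r := by
  intro rs
  induction rs with
  | nil => simp
  | cons r rs ih =>
    intro a
    simp only [List.foldl_cons, ih, le_max_iff, List.mem_cons]
    constructor
    · rintro ((h | h) | ⟨x, hx, hv⟩)
      · exact Or.inl h
      · exact Or.inr ⟨r, Or.inl rfl, h⟩
      · exact Or.inr ⟨x, Or.inr hx, hv⟩
    · rintro (h | ⟨x, (rfl | hx), hv⟩)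
      · exact Or.inl (Or.inl h)
      · exact Or.inl (Or.inr hv)
      · exact Or.inr ⟨x, hx, hv⟩

theorem maxfold_le (f : Int → Int) (b : Int) :
    ∀ (rs : List Int) (a : Int), a ≤ b → (∀ r ∈ rs, f r ≤ b) →
      rs.foldl (fun m r => max m (f r)) a ≤ b := by
  intro rs
  induction rs with
  | nil => intro a ha _; simpa using ha
  | cons r rs ih =>
    intro a ha h
    exact ih _ (max_le ha (h r (by simp))) (fun x hx => h x (by simp [hx]))

theorem cellVal_bounds (G : List String) (col row : Int) (h : cellOk G col row) :
    0 ≤ cellVal G col row ∧ cellVal G col row ≤ 9 := by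
  obtain ⟨c, hc, hv⟩ := h
  unfold cellVal
  rw [hc]
  show (0 ≤ if c = '.' then 0 else (PySem.Int.ofChars? [c]).getD 0) ∧
    (if c = '.' then 0 else (PySem.Int.ofChars? [c]).getD 0) ≤ 9
  rcases hv with rfl | hd
  · simp
  · have hb : 48 ≤ c.toNat ∧ c.toNat ≤ 57 := by
      simp only [Char.isDigit, Bool.and_eq_true, decide_eq_true_iff] at hd
      exact ⟨by exact_mod_cast hd.1, by exact_mod_cast hd.2⟩
    have hne : c ≠ '.' := by
      intro h'; subst h'; revert hb; decide
    rw [if_neg hne, ofChars_digit c hd]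
    simp only [Option.getD_some]
    omega

/-- Under validity the threshold test `d ≤ c` (Python's 1-char string comparison)
    is exactly `value of d ≤ cellVal` for thresholds '1'..'9'. -/
theorem threshold_bridge (G : List String) (col row : Int) (h : cellOk G col row)
    (d : Char) (hd : d ∈ "123456789".toList) :
    (match PySem.Str.pyGet? (PySem.List.pyGetD G row "") col with
      | none => false
      | some c => decide (d ≤ c))
    = decide (((d.toNat : Int) - 48) ≤ cellVal G col row) := by
  obtain ⟨c, hc, hv⟩ := h
  have hdb := mem_digits_bounds d hd
  unfold cellVal
  rw [hc]
  show decide (d ≤ c) = decide (((d.toNat : Int) - 48) ≤ if c = '.' then 0 else (PySem.Int.ofChars? [c]).getD 0)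
  rcases hv with rfl | hdg
  · rw [if_pos rfl, decide_eq_decide, char_le_iff]
    have h46 : ('.' : Char).toNat = 46 := rfl
    omega
  · have hb : 48 ≤ c.toNat ∧ c.toNat ≤ 57 := by
      simp only [Char.isDigit, Bool.and_eq_true, decide_eq_true_iff] at hdg
      exact ⟨by exact_mod_cast hdg.1, by exact_mod_cast hdg.2⟩
    have hne : c ≠ '.' := by
      intro h'; subst h'; revert hb; decide
    rw [if_neg hne, ofChars_digit c hdg]
    simp only [Option.getD_some]
    rw [decide_eq_decide, char_le_iff]
    omega

/-- Per column: the nine layer indicators of B sum to A's column maximum. -/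
theorem col_sum_eq (G : List String) (N col : Int)
    (h : ∀ row ∈ PySem.List.pyRange 0 N 1, cellOk G col row) :
    ("123456789".toList.map (fun d =>
      if (PySem.List.pyRange 0 N 1).any (fun row =>
            match PySem.Str.pyGet? (PySem.List.pyGetD G row "") col with
            | none => false
            | some c => decide (d ≤ c)) = true
      then (1 : Int) else 0)).sum
    = (PySem.List.pyRange 0 N 1).foldl (fun m row => max m (cellVal G col row)) 0 := by
  set rs := PySem.List.pyRange 0 N 1 with hrs
  set m := rs.foldl (fun m row => max m (cellVal G col row)) 0 with hmdef
  have hm0 : 0 ≤ m := (PySem.List.le_foldl_max_int rs (cellVal G col) 0).1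
  have hm9 : m ≤ 9 := maxfold_le _ 9 rs 0 (by norm_num) (fun r hr => (cellVal_bounds G col r (h r hr)).2)
  have hind : ∀ d ∈ "123456789".toList,
      (if rs.any (fun row =>
            match PySem.Str.pyGet? (PySem.List.pyGetD G row "") col with
            | none => false
            | some c => decide (d ≤ c)) = true then (1 : Int) else 0)
      = if ((d.toNat : Int) - 48) ≤ m then (1 : Int) else 0 := by
    intro d hd
    have hdb := mem_digits_bounds d hd
    have h1 : rs.any (fun row =>
          match PySem.Str.pyGet? (PySem.List.pyGetD G row "") col with
          | none => false
          | some c => decide (d ≤ c))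
        = rs.any (fun row => decide (((d.toNat : Int) - 48) ≤ cellVal G col row)) :=
      PySem.List.any_congr_mem (fun row hr => threshold_bridge G col row (h row hr) d hd)
    rw [h1]
    have h2 : (rs.any (fun row => decide (((d.toNat : Int) - 48) ≤ cellVal G col row)) = true)
        ↔ (((d.toNat : Int) - 48) ≤ m) := by
      rw [List.any_eq_true]
      rw [hmdef, le_maxfold_iff]
      constructor
      · rintro ⟨r, hr, hv⟩
        exact Or.inr ⟨r, hr, of_decide_eq_true hv⟩
      · rintro (hv | ⟨r, hr, hv⟩)
        · omega
        · exact ⟨r, hr, decide_eq_true hv⟩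
    by_cases hvm : ((d.toNat : Int) - 48) ≤ m
    · rw [if_pos (h2.mpr hvm), if_pos hvm]
    · rw [if_neg (fun hh => hvm (h2.mp hh)), if_neg hvm]
  rw [List.map_congr_left hind]
  have e : "123456789".toList = ['1','2','3','4','5','6','7','8','9'] := rfl
  rw [e]
  simp only [List.map_cons, List.map_nil, List.sum_cons, List.sum_nil]
  have h1 : (('1' : Char).toNat : Int) = 49 := rfl
  have h2 : (('2' : Char).toNat : Int) = 50 := rfl
  have h3 : (('3' : Char).toNat : Int) = 51 := rfl
  have h4 : (('4' : Char).toNat : Int) = 52 := rfl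
  have h5 : (('5' : Char).toNat : Int) = 53 := rfl
  have h6 : (('6' : Char).toNat : Int) = 54 := rfl
  have h7 : (('7' : Char).toNat : Int) = 55 := rfl
  have h8 : (('8' : Char).toNat : Int) = 56 := rfl
  have h9 : (('9' : Char).toNat : Int) = 57 := rfl
  rw [h1, h2, h3, h4, h5, h6, h7, h8, h9]
  split_ifs <;> omega

/-- Sums over two index lists commute. -/
theorem sum_sum_comm (l1 : List Char) (l2 : List Int) (f : Char → Int → Int) :
    (l1.map (fun a => (l2.map (f a)).sum)).sum
      = (l2.map (fun b => (l1.map (fun a => f a b)).sum)).sum := by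
  induction l1 with
  | nil => simp
  | cons a l1 ih => simp [ih]

-- ===== VERDICT (by name: the statement is the Claim_ definition above) =====
theorem solve_spec : Claim_equal_solve := by
  intro N M G _ hpre
  unfold Spec_solve
  have hvalid : ∀ col ∈ PySem.List.pyRange 0 M 1, ∀ row ∈ PySem.List.pyRange 0 N 1,
      cellOk G col row := by
    intro col hcol row hrow
    rw [PySem.List.mem_pyRange_one] at hcol hrow
    obtain ⟨hc0, hcM⟩ := hcol
    obtain ⟨hr0, hrN⟩ := hrow
    have hN : 0 < N := lt_of_le_of_lt hr0 hrN
    have hM : 0 < M := lt_of_le_of_lt hc0 hcM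
    obtain ⟨hlen, hall⟩ := hpre hN hM
    have hrow_lt : row.toNat < G.length := by omega
    have hgd : PySem.List.pyGetD G row "" = G[row.toNat] := by
      apply PySem.List.pyGetD_eq_getElem <;> omega
    have hmem : G[row.toNat] ∈ G.take N.toNat := by
      have hlt : row.toNat < (G.take N.toNat).length := by
        simp only [List.length_take]
        omega
      have : (G.take N.toNat)[row.toNat] = G[row.toNat] := List.getElem_take
      rw [← this]
      exact List.getElem_mem hlt
    rw [List.all_eq_true] at hall
    have hs := hall _ hmem
    simp only [Bool.and_eq_true, decide_eq_true_iff, List.all_eq_true] at hs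
    obtain ⟨hslen, hchars⟩ := hs
    have hcol_lt : col.toNat < (G[row.toNat]).toList.length := by omega
    have hget : PySem.Str.pyGet? (PySem.List.pyGetD G row "") col
        = some ((G[row.toNat]).toList[col.toNat]) := by
      rw [hgd]
      simp only [PySem.Str.pyGet?_eq]
      simp only [PySem.Chars.pyGet?_eq_listPyGet?]
      apply PySem.List.pyGet?_eq_some_getElem <;> omega
    refine ⟨(G[row.toNat]).toList[col.toNat], hget, ?_⟩
    have hcmem : (G[row.toNat]).toList[col.toNat] ∈ (G[row.toNat]).toList.take M.toNat := by
      have hlt2 : col.toNat < ((G[row.toNat]).toList.take M.toNat).length := by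
        simp only [List.length_take]; omega
      have : ((G[row.toNat]).toList.take M.toNat)[col.toNat] = (G[row.toNat]).toList[col.toNat] :=
        List.getElem_take
      rw [← this]
      exact List.getElem_mem hlt2
    have := hchars _ hcmem
    simp only [Bool.or_eq_true, beq_iff_eq] at this
    exact this
  -- A as a sum of column maxima
  have hA : solve N M G
      = ((PySem.List.pyRange 0 M 1).map (fun col =>
          (PySem.List.pyRange 0 N 1).foldl (fun m row => max m (cellVal G col row)) 0)).sum := by
    unfold solve
    rw [PySem.List.foldl_add (g := fun col =>
      (PySem.List.pyRange 0 N 1).foldl (fun max_d row =>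
        match PySem.Str.pyGet? (PySem.List.pyGetD G row "") col with
        | none => max_d
        | some c =>
          if c ≠ '.' then
            if (PySem.Int.ofChars? [c]).getD 0 > max_d then (PySem.Int.ofChars? [c]).getD 0 else max_d
          else max_d) 0)]
    rw [zero_add]
    exact congrArg List.sum (List.map_congr_left
      (fun col _ => A_fold_eq_max G col _ 0 le_rfl))
  -- B as a double sum of 0/1 indicators
  have hB : solve_alt N M G
      = ("123456789".toList.map (fun d =>
          ((PySem.List.pyRange 0 M 1).map (fun col =>
            if (PySem.List.pyRange 0 N 1).any (fun row =>
                  match PySem.Str.pyGet? (PySem.List.pyGetD G row "") col with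
                  | none => false
                  | some c => decide (d ≤ c)) = true
            then (1 : Int) else 0)).sum)).sum := by
    unfold solve_alt
    have hfun : (fun (area : Int) (d : Char) =>
        (PySem.List.pyRange 0 M 1).foldl (fun area col =>
          if (PySem.List.pyRange 0 N 1).any (fun row =>
                match PySem.Str.pyGet? (PySem.List.pyGetD G row "") col with
                | none => false
                | some c => decide (d ≤ c))
          then area + 1 else area) area)
      = (fun (area : Int) (d : Char) => area +
          ((PySem.List.pyRange 0 M 1).map (fun col =>
            if (PySem.List.pyRange 0 N 1).any (fun row =>
                  match PySem.Str.pyGet? (PySem.List.pyGetD G row "") col with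
                  | none => false
                  | some c => decide (d ≤ c)) = true
            then (1 : Int) else 0)).sum) := by
      funext area d
      rw [show (fun (a : Int) (col : Int) =>
          if (PySem.List.pyRange 0 N 1).any (fun row =>
                match PySem.Str.pyGet? (PySem.List.pyGetD G row "") col with
                | none => false
                | some c => decide (d ≤ c))
          then a + 1 else a)
        = (fun (a : Int) (col : Int) => a +
            if (PySem.List.pyRange 0 N 1).any (fun row =>
                  match PySem.Str.pyGet? (PySem.List.pyGetD G row "") col with
                  | none => false
                  | some c => decide (d ≤ c)) = true
            then (1 : Int) else 0) from funext fun a => funext fun col => by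
          split_ifs <;> omega]
      exact PySem.List.foldl_add _ _ area
    rw [hfun, PySem.List.foldl_add, zero_add]
  rw [hA, hB, sum_sum_comm]
  exact congrArg List.sum (List.map_congr_left
    (fun col hcol => (col_sum_eq G N col (hvalid col hcol)).symm))
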